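-- pv_equiv track=rewrite | github.com/xhy0303/- | 作业/Python程序设计/实验五/代码/实验/删除字符.py | process
-- ===== SOURCE A (Python) =====
-- def process(src, dst, num):
--     if num==0:
--         if src==dst:
--             return True
--     elif num>0:
--         for i in range(len(src)):
--             tmp = src[:i] + src[i + 1:]
--             sign=process(tmp, dst, num - 1)
--             if sign==True:
--                 return sign
-- ===== SOURCE B (Python) =====
-- def process(src, dst, num):
--     # Two-pointer subsequence check: deleting exactly num chars from src can
--     # yield dst iff len(src) == len(dst) + num and dst is a subsequence of src.
--     # Like A, returns True on success and None (falls through) otherwise.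
--     if num < 0:
--         return None
--     if len(src) != len(dst) + num:
--         return None
--     i = 0
--     for ch in src:
--         if i < len(dst) and dst[i] == ch:
--             i += 1
--     if i == len(dst):
--         return True
-- ===== Notes on version B (the rewrite author's own statement) =====
-- stated objective: faster
-- what changed: Replaces A's exponential recursion over all single-character deletions with a linear two-pointer subsequence check plus the length condition len(src)==len(dst)+num; intended as faster (a timing run saw A time out from n=16 while B returned; on sizes where both finish A is too quick for a ratio); like A it returns True on success and falls through to None otherwise.
import Mathlib
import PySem

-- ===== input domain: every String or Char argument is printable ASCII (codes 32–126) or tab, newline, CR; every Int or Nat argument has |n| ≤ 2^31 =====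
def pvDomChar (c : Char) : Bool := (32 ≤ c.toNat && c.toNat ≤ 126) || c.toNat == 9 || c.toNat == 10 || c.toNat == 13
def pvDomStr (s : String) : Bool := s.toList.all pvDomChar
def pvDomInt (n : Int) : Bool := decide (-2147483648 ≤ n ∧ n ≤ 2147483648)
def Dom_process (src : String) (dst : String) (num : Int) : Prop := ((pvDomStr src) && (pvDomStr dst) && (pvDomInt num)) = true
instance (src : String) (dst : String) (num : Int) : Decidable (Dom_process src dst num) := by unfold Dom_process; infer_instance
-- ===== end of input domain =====

-- B replaces A's exhaustive recursion over all single-character deletions by a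
-- linear two-pointer subsequence check plus the length condition (intended as faster;
-- a timing run saw A time out from n=16 where B returned).
-- Like A, both return `some true` on success and `none` (Python: falls through) otherwise.

-- ===== PORT A =====
-- A's recursion, on the character lists (dst is fixed, src and num vary).
def processAList (d : List Char) (s : List Char) (num : Int) : Option Bool :=
  if num = 0 then
    (if s = d then some true else none)
  else if 0 < num then
    (List.range s.length).foldl
      (fun acc (i : Nat) =>
        match acc with
        | some true => some true
        | _ =>
          let tmp := PySem.List.slice s none (some (i : Int)) ++
                     PySem.List.slice s (some ((i : Int) + 1)) none
          processAList d tmp (num - 1))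
      none
  else none
termination_by num.toNat
decreasing_by omega

def process (src : String) (dst : String) (num : Int) : Option Bool :=
  processAList dst.toList src.toList num

-- ===== PORT B =====
def process_alt (src : String) (dst : String) (num : Int) : Option Bool :=
  if num < 0 then none
  else if (src.toList.length : Int) ≠ (dst.toList.length : Int) + num then none
  else
    let i := src.toList.foldl
      (fun j ch => if j < dst.toList.length ∧ dst.toList[j]? = some ch then j + 1 else j) 0
    if i = dst.toList.length then some true else none

-- ===== PRECONDITION & SPEC =====
def Spec_process (src : String) (dst : String) (num : Int) (out : Option Bool) : Prop := out = process_alt src dst num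
instance (src : String) (dst : String) (num : Int) (out : Option Bool) : Decidable (Spec_process src dst num out) := by unfold Spec_process; infer_instance

-- ===== CLAIM (what is proved, stated in full; the proofs are below) =====
def Claim_equal_process : Prop := ∀ (src : String) (dst : String) (num : Int), Dom_process src dst num → Spec_process src dst num (process src dst num)

-- ===== LEMMAS AND PROOFS =====

-- A's early-return loop saturates once it has produced `some true`
lemma foldl_sat (f : Nat → Option Bool) (l : List Nat) :
    l.foldl (fun acc (i : Nat) =>
      match acc with
      | some true => some true
      | _ => f i) (some true) = some true := by
  induction l with
  | nil => rfl
  | cons a l ih => simpa using ih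

-- A's saturating early-return loop returns `some true` iff some index yields `some true`
lemma foldl_orSome (f : Nat → Option Bool)
    (hf : ∀ i, f i = some true ∨ f i = none) (l : List Nat) :
    l.foldl (fun acc (i : Nat) =>
      match acc with
      | some true => some true
      | _ => f i) none
      = if ∃ i ∈ l, f i = some true then some true else none := by
  induction l with
  | nil => simp
  | cons a l ih =>
    simp only [List.foldl_cons]
    show l.foldl _ (f a) = _
    rcases hf a with h | h
    · rw [h, foldl_sat]
      have hex : ∃ i ∈ a :: l, f i = some true := ⟨a, List.mem_cons_self, h⟩
      rw [if_pos hex]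
    · rw [h, ih]
      have hiff : (∃ i ∈ l, f i = some true) ↔ (∃ i ∈ a :: l, f i = some true) := by
        constructor
        · rintro ⟨i, hi, hfi⟩; exact ⟨i, List.mem_cons_of_mem _ hi, hfi⟩
        · rintro ⟨i, hi, hfi⟩
          rcases List.mem_cons.mp hi with rfl | hi
          · rw [h] at hfi; cases hfi
          · exact ⟨i, hi, hfi⟩
      simp only [hiff]

-- a strictly shorter sublist survives the deletion of some single index
lemma exists_eraseIdx {d s : List Char} (h : List.Sublist d s) (hl : d.length < s.length) :
    ∃ i < s.length, List.Sublist d (s.eraseIdx i) := by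
  induction h with
  | slnil => simp at hl
  | cons a h ih =>
    exact ⟨0, by simp, by simpa using h⟩
  | cons₂ a h ih =>
    obtain ⟨i, hi, hsub⟩ := ih (by simpa using hl)
    exact ⟨i + 1, by simpa using hi, by simpa using List.Sublist.cons₂ a hsub⟩

-- characterisation of A's recursion: `some true` iff dst is a sublist and the lengths fit
lemma A_char (d : List Char) : ∀ (n : Nat) (s : List Char),
    processAList d s (n : Int)
      = if List.Sublist d s ∧ s.length = d.length + n then some true else none := by
  intro n
  induction n with
  | zero =>
    intro s
    rw [processAList, if_pos (by norm_num)]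
    by_cases h : s = d
    · subst h
      rw [if_pos rfl, if_pos ⟨List.Sublist.refl s, by simp⟩]
    · have hno : ¬ (List.Sublist d s ∧ s.length = d.length + 0) := by
        rintro ⟨hsub, hlen⟩
        exact h (hsub.eq_of_length (by omega)).symm
      rw [if_neg h, if_neg hno]
  | succ n ih =>
    intro s
    rw [processAList]
    have h0 : ((n + 1 : Nat) : Int) ≠ 0 := by omega
    have h1 : (0 : Int) < ((n + 1 : Nat) : Int) := by omega
    have h2 : ((n + 1 : Nat) : Int) - 1 = (n : Int) := by omega
    rw [if_neg h0, if_pos h1]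
    have hfun : (fun (acc : Option Bool) (i : Nat) =>
        match acc with
        | some true => some true
        | _ =>
          let tmp := PySem.List.slice s none (some (i : Int)) ++
                     PySem.List.slice s (some ((i : Int) + 1)) none
          processAList d tmp (((n + 1 : Nat) : Int) - 1))
        = (fun (acc : Option Bool) (i : Nat) =>
        match acc with
        | some true => some true
        | _ =>
          if List.Sublist d (s.eraseIdx i) ∧ (s.eraseIdx i).length = d.length + n
          then some true else none) := by
      funext acc i
      have hstep : (PySem.List.slice s none (some (i : Int)) ++
          PySem.List.slice s (some ((i : Int) + 1)) none) = s.eraseIdx i := by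
        have hcast : ((i : Int) + 1) = ((i + 1 : Nat) : Int) := by push_cast; ring
        rw [hcast, PySem.List.slice_to_natCast, PySem.List.slice_from_natCast,
          List.eraseIdx_eq_take_drop_succ]
      have hbody : processAList d (PySem.List.slice s none (some (i : Int)) ++
            PySem.List.slice s (some ((i : Int) + 1)) none) (((n + 1 : Nat) : Int) - 1)
          = if List.Sublist d (s.eraseIdx i) ∧ (s.eraseIdx i).length = d.length + n
            then some true else none := by
        rw [hstep, h2, ih]
      match acc with
      | none => exact hbody
      | some true => rfl
      | some false => exact hbody
    rw [hfun, foldl_orSome _ (fun i => by split_ifs <;> simp)]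
    by_cases hex : ∃ i ∈ List.range s.length,
        (if List.Sublist d (s.eraseIdx i) ∧ (s.eraseIdx i).length = d.length + n
         then (some true : Option Bool) else none) = some true
    · obtain ⟨i, hi, hfi⟩ := hex
      have hi' : i < s.length := List.mem_range.mp hi
      have hcond : List.Sublist d (s.eraseIdx i) ∧ (s.eraseIdx i).length = d.length + n := by
        by_contra hc; rw [if_neg hc] at hfi; cases hfi
      have hgoal : List.Sublist d s ∧ s.length = d.length + (n + 1) := by
        refine ⟨hcond.1.trans (List.eraseIdx_sublist s i), ?_⟩
        have hlen := hcond.2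
        rw [List.length_eraseIdx_of_lt hi'] at hlen
        omega
      rw [if_pos ⟨i, hi, hfi⟩, if_pos hgoal]
    · have hgoal : ¬ (List.Sublist d s ∧ s.length = d.length + (n + 1)) := by
        rintro ⟨hsub, hlen⟩
        obtain ⟨i, hi, hsub'⟩ := exists_eraseIdx hsub (by omega)
        refine hex ⟨i, List.mem_range.mpr hi, ?_⟩
        have hlen' : (s.eraseIdx i).length = d.length + n := by
          rw [List.length_eraseIdx_of_lt hi]; omega
        rw [if_pos ⟨hsub', hlen'⟩]
      rw [if_neg hex, if_neg hgoal]

-- B's two-pointer loop: the matched count reaches |d| iff the unmatched suffix is a sublist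
lemma counterLoop (d : List Char) : ∀ (s : List Char) (i : Nat), i ≤ d.length →
    (s.foldl (fun j ch => if j < d.length ∧ d[j]? = some ch then j + 1 else j) i = d.length
      ↔ List.Sublist (d.drop i) s) := by
  intro s
  induction s with
  | nil =>
    intro i hi
    simp only [List.foldl_nil, List.sublist_nil, List.drop_eq_nil_iff]
    omega
  | cons c s ih =>
    intro i hi
    simp only [List.foldl_cons]
    by_cases h : i < d.length ∧ d[i]? = some c
    · rw [if_pos h]
      have hdi : d[i] = c := by
        have h2 := h.2
        rw [List.getElem?_eq_getElem h.1] at h2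
        exact Option.some.inj h2
      have hdrop : d.drop i = c :: d.drop (i + 1) := by
        rw [List.drop_eq_getElem_cons h.1, hdi]
      rw [ih (i + 1) (by omega), hdrop, List.cons_sublist_cons]
    · rw [if_neg h, ih i hi]
      by_cases hlen : i < d.length
      · have hne : d[i]? ≠ some c := fun hc => h ⟨hlen, hc⟩
        have hdrop : d.drop i = d[i] :: d.drop (i + 1) := List.drop_eq_getElem_cons hlen
        constructor
        · exact fun hs => hs.trans (List.sublist_cons_self c s)
        · intro hs
          rcases List.sublist_cons_iff.mp hs with hs' | ⟨r, hr, hrs⟩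
          · exact hs'
          · exfalso
            apply hne
            rw [List.getElem?_eq_getElem hlen]
            rw [hdrop] at hr
            exact congrArg some (List.cons.inj hr).1
      · have hi' : i = d.length := by omega
        subst hi'
        simp

-- assembling: both ports compute the same Option Bool
lemma ports_agree (src dst : String) (num : Int) :
    process src dst num = process_alt src dst num := by
  unfold process process_alt
  set s := src.toList with hs
  set d := dst.toList with hd
  by_cases hneg : num < 0
  · rw [if_pos hneg, processAList, if_neg (by omega : num ≠ 0), if_neg (by omega : ¬ 0 < num)]
  · rw [if_neg hneg]
    have hnum : num = ((num.toNat : Nat) : Int) := by omega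
    rw [hnum, A_char]
    by_cases hlen : (s.length : Int) ≠ (d.length : Int) + ((num.toNat : Nat) : Int)
    · rw [if_pos hlen, if_neg (by rintro ⟨_, hc⟩; apply hlen; omega)]
    · rw [if_neg hlen]
      have hlen' : s.length = d.length + num.toNat := by omega
      have hfold := counterLoop d s 0 (by omega)
      simp only [List.drop_zero] at hfold
      show _ = if (s.foldl (fun j ch => if j < d.length ∧ d[j]? = some ch then j + 1 else j) 0)
                  = d.length then some true else none
      by_cases hsub : s.foldl (fun j ch => if j < d.length ∧ d[j]? = some ch then j + 1 else j) 0
          = d.length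
      · rw [if_pos hsub, if_pos ⟨hfold.mp hsub, hlen'⟩]
      · rw [if_neg hsub, if_neg (by rintro ⟨hc, _⟩; exact hsub (hfold.mpr hc))]

-- ===== VERDICT (by name: the statement is the Claim_ definition above) =====
theorem process_spec : Claim_equal_process := by
  intro src dst num _
  unfold Spec_process
  exact ports_agree src dst num
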